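-- pv_equiv track=rewrite | github.com/Si-36/osiris | fix_all_remaining_syntax.py | fix_pass_statements
-- ===== SOURCE A (Python) =====
-- def fix_pass_statements(content):
--     """Remove unnecessary pass statements."""
--     lines = content.split('\n')
--     fixed_lines = []
--
--     for i, line in enumerate(lines):
--         # Skip pass lines that are followed by actual code
--         if line.strip() == 'pass':
--             # Check if next line has actual code (not a comment or empty)
--             if i + 1 < len(lines):
--                 next_line = lines[i + 1]
--                 if next_line.strip() and not next_line.strip().startswith('#'):
--                     # Skip this pass statement
--                     continue
--
--         fixed_lines.append(line)
--
--     return '\n'.join(fixed_lines)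
-- ===== SOURCE B (Python) =====
-- def fix_pass_statements(content):
--     """Remove unnecessary pass statements (single backward pass threading a lookahead flag)."""
--     result = []
--     next_is_real = False
--     for line in reversed(content.split('\n')):
--         s = line.strip()
--         if not (s == 'pass' and next_is_real):
--             result.append(line)
--         next_is_real = bool(s) and not s.startswith('#')
--     result.reverse()
--     return '\n'.join(result)
-- ===== Notes on version B (the rewrite author's own statement) =====
-- stated objective: alternative
-- what changed: Replaced the forward enumerate-with-index loop that peeks at lines[i+1] by a single backward pass over reversed(lines) threading a boolean flag recording whether the following line is real code, so no index arithmetic or random access remains.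
import Mathlib
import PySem

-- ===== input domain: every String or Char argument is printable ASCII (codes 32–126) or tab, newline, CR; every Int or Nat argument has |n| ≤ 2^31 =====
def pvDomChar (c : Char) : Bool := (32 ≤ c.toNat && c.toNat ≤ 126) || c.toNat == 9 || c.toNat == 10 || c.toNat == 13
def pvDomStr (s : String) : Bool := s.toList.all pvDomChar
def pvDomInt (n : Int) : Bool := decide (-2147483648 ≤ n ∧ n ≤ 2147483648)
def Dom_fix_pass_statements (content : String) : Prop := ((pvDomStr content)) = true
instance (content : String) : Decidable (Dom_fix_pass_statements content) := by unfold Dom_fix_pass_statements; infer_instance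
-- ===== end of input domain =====

-- B replaces A's forward index loop peeking at lines[i+1] by one backward pass threading a lookahead flag (objective: alternative decomposition, same cost).

-- ===== PORT A =====
-- A-side helper: the body of A's for-loop (one enumerate step; 'continue' = return acc unchanged)
def stepA (lines : List String) (acc : List String) (p : Int × String) : List String :=
  if PySem.Str.strip p.2 = "pass" then
    if p.1 + 1 < (lines.length : Int) then
      let next_line := PySem.List.pyGetD lines (p.1 + 1) ""
      if PySem.Str.strip next_line ≠ "" ∧ PySem.Str.startswith (PySem.Str.strip next_line) "#" = false then
        acc
      else acc ++ [p.2]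
    else acc ++ [p.2]
  else acc ++ [p.2]

def fix_pass_statements (content : String) : String :=
  -- split? is always `some` here since the separator "\n" is nonempty
  let lines := (PySem.Str.split? content "\n").getD []
  let fixed_lines := (PySem.List.enumerate lines).foldl (stepA lines) []
  PySem.Str.join "\n" fixed_lines

-- ===== PORT B =====
-- B-side helper: one step of B's backward pass; state = (next_is_real, result so far)
def stepB (st : Bool × List String) (line : String) : Bool × List String :=
  let s := PySem.Str.strip line
  let res := if s = "pass" ∧ st.1 = true then st.2 else st.2 ++ [line]
  (decide (s ≠ "") && !(PySem.Str.startswith s "#"), res)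

def fix_pass_statements_alt (content : String) : String :=
  -- split? is always `some` here since the separator "\n" is nonempty
  let lines := (PySem.Str.split? content "\n").getD []
  let st := lines.reverse.foldl stepB (false, [])
  PySem.Str.join "\n" st.2.reverse

-- ===== PRECONDITION & SPEC =====
def Spec_fix_pass_statements (content : String) (out : String) : Prop := out = fix_pass_statements_alt content
instance (content : String) (out : String) : Decidable (Spec_fix_pass_statements content out) := by unfold Spec_fix_pass_statements; infer_instance

-- ===== CLAIM (what is proved, stated in full; the proofs are below) =====
def Claim_equal_fix_pass_statements : Prop := ∀ (content : String), Dom_fix_pass_statements content → Spec_fix_pass_statements content (fix_pass_statements content)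

-- ===== LEMMAS AND PROOFS =====

-- "real code" test both programs apply to the following line
def realLine (l : String) : Bool :=
  decide (PySem.Str.strip l ≠ "") && !(PySem.Str.startswith (PySem.Str.strip l) "#")

def headReal : List String → Bool
  | [] => false
  | l :: _ => realLine l

-- common functional characterisation: which lines survive
def keep : List String → List String
  | [] => []
  | l :: rest =>
    if PySem.Str.strip l = "pass" ∧ headReal rest = true then keep rest
    else l :: keep rest

theorem realLine_iff (l : String) :
    realLine l = true ↔ (PySem.Str.strip l ≠ "" ∧ PySem.Str.startswith (PySem.Str.strip l) "#" = false) := by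
  simp [realLine]

theorem stepB_eq (st : Bool × List String) (line : String) :
    stepB st line =
      (realLine line,
        if PySem.Str.strip line = "pass" ∧ st.1 = true then st.2 else st.2 ++ [line]) := rfl

theorem foldA_eq_keep (lines : List String) :
    ∀ (s : List String) (i : Nat), lines.drop i = s →
    ∀ (acc : List String),
      (PySem.List.enumerate s (i : Int)).foldl (stepA lines) acc = acc ++ keep s := by
  intro s
  induction s with
  | nil => intro i _ acc; simp [PySem.List.enumerate, keep]
  | cons l rest ih =>
    intro i hdrop acc
    have hdrop' : lines.drop (i + 1) = rest := by
      have := congrArg List.tail hdrop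
      simpa [List.tail_drop] using this
    rw [PySem.List.enumerate_cons, List.foldl_cons]
    have hcond : stepA lines acc ((i : Int), l) =
        (if PySem.Str.strip l = "pass" ∧ headReal rest = true then acc else acc ++ [l]) := by
      unfold stepA
      by_cases hp : PySem.Str.strip l = "pass"
      · rw [if_pos hp]
        cases rest with
        | nil =>
          have hlen2 : lines.length = i + 1 := by
            have := congrArg List.length hdrop
            simp at this; omega
          have hnl : ¬ ((i : Int) + 1 < (lines.length : Int)) := by
            rw [hlen2]; omega
          rw [if_neg hnl, if_neg (by simp [headReal])]
        | cons r t =>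
          have hlt : (i : Int) + 1 < (lines.length : Int) := by
            have := congrArg List.length hdrop
            simp at this
            push_cast; omega
          have hget : PySem.List.pyGetD lines ((i : Int) + 1) "" = r := by
            have h1 : ((i : Int) + 1) = ((i + 1 : Nat) : Int) := by push_cast; ring
            have h2 : lines[i+1]? = some r := by
              have h := congrArg (fun xs : List String => xs[0]?) hdrop'
              simpa [List.getElem?_drop] using h
            rw [h1, PySem.List.pyGetD_natCast]
            simp [h2]
          rw [if_pos hlt]
          show (if PySem.Str.strip (PySem.List.pyGetD lines ((i : Int) + 1) "") ≠ "" ∧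
                   PySem.Str.startswith (PySem.Str.strip (PySem.List.pyGetD lines ((i : Int) + 1) "")) "#" = false
                then acc else acc ++ [l]) = _
          rw [hget]
          have hhr : headReal (r :: t) = realLine r := rfl
          split_ifs with h1 h2 h2
          · rfl
          · exact absurd ⟨hp, by rw [hhr]; exact (realLine_iff r).mpr h1⟩ h2
          · exact absurd ((realLine_iff r).mp (hhr ▸ h2.2)) h1
          · rfl
      · simp [hp]
    rw [hcond]
    have h1 : ((i : Int) + 1) = ((i + 1 : Nat) : Int) := by push_cast; ring
    by_cases hc : PySem.Str.strip l = "pass" ∧ headReal rest = true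
    · rw [if_pos hc, h1, ih (i + 1) hdrop' acc]
      simp [keep, hc]
    · rw [if_neg hc, h1, ih (i + 1) hdrop' (acc ++ [l])]
      simp [keep, hc]

theorem foldB_eq_keep (L : List String) (acc : List String) :
    L.reverse.foldl stepB (false, acc) = (headReal L, acc ++ (keep L).reverse) := by
  induction L generalizing acc with
  | nil => simp [headReal, keep]
  | cons l rest ih =>
    rw [List.reverse_cons, List.foldl_append, ih, List.foldl_cons, List.foldl_nil, stepB_eq]
    have hh : headReal (l :: rest) = realLine l := rfl
    rw [hh, Prod.mk.injEq]
    refine ⟨rfl, ?_⟩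
    show (if PySem.Str.strip l = "pass" ∧ headReal rest = true then acc ++ (keep rest).reverse
          else acc ++ (keep rest).reverse ++ [l]) = acc ++ (keep (l :: rest)).reverse
    by_cases hc : PySem.Str.strip l = "pass" ∧ headReal rest = true
    · rw [if_pos hc]; simp [keep, hc]
    · rw [if_neg hc]; simp [keep, hc]

-- ===== VERDICT (by name: the statement is the Claim_ definition above) =====
theorem fix_pass_statements_spec : Claim_equal_fix_pass_statements := by
  intro content _
  show fix_pass_statements content = fix_pass_statements_alt content
  have hA := foldA_eq_keep ((PySem.Str.split? content "\n").getD [])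
    ((PySem.Str.split? content "\n").getD []) 0 rfl []
  have hB := foldB_eq_keep ((PySem.Str.split? content "\n").getD []) []
  simp only [Nat.cast_zero] at hA
  show PySem.Str.join "\n"
      ((PySem.List.enumerate ((PySem.Str.split? content "\n").getD [])).foldl
        (stepA ((PySem.Str.split? content "\n").getD [])) []) =
    PySem.Str.join "\n"
      ((((PySem.Str.split? content "\n").getD []).reverse.foldl stepB (false, [])).2.reverse)
  rw [hA, hB]
  simp
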